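-- pv_equiv track=rewrite | github.com/tanay-gangey/RideShare | worker/worker.py | checkHash
-- ===== SOURCE A (Python) =====
-- def checkHash(password):
--     if len(password) == 40:
--         password = password.lower()
--         charSet = {"a", "b", "c", "d", "e", "f"}
--         numSet = {'1', '2', '3', '4', '5', '6', '7', '8', '9', '0'}
--         for char in password:
--             if char not in charSet and char not in numSet:
--                 return False
--         return True
--     return False
-- ===== SOURCE B (Python) =====
-- def checkHash(password):
--     if len(password) != 40:
--         return False
--     freq = {}
--     for c in password.lower():
--         freq[c] = freq.get(c, 0) + 1
--     return sum(freq.get(c, 0) for c in "0123456789abcdef") == 40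
-- ===== Notes on version B (the rewrite author's own statement) =====
-- stated objective: alternative
-- what changed: Replaces A's short-circuiting per-character membership scan over two hand-built sets by a histogram: B builds a character-frequency dictionary of the lowercased string in one pass and then checks that the tallies of the 16 hex characters sum to 40, never testing any character for set membership.
import Mathlib
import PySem

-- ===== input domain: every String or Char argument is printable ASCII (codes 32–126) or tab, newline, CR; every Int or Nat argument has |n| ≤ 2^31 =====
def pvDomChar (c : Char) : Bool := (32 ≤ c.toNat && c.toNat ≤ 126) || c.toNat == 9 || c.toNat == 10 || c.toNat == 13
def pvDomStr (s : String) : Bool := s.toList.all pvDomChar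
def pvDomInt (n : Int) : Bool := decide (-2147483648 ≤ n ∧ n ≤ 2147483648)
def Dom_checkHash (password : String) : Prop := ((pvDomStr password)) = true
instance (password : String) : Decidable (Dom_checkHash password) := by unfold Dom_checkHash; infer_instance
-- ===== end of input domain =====

-- B replaces A's per-character early-return membership loop by a character-frequency
-- histogram whose hex tallies are summed and compared with 40 (objective: alternative).


-- ===== PORT A =====
def pvCharSetA : PySem.Set Char := PySem.Set.ofList ['a', 'b', 'c', 'd', 'e', 'f']
def pvNumSetA : PySem.Set Char := PySem.Set.ofList ['1', '2', '3', '4', '5', '6', '7', '8', '9', '0']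

-- the 'for char in password: if … return False' loop, with its early return
def pvLoopA : List Char → Bool
  | [] => true
  | c :: rest =>
    if ¬ (PySem.Set.contains pvCharSetA c) ∧ ¬ (PySem.Set.contains pvNumSetA c) then false
    else pvLoopA rest

def checkHash (password : String) : Bool :=
  if PySem.Str.len password = 40 then pvLoopA (PySem.Str.lower password).toList
  else false

-- ===== PORT B =====
def pvHexChars : List Char := "0123456789abcdef".toList

def checkHash_alt (password : String) : Bool :=
  if PySem.Str.len password ≠ 40 then false
  else
    -- freq = {}; for c in password.lower(): freq[c] = freq.get(c, 0) + 1
    let freq : PySem.Dict Char Int :=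
      (PySem.Str.lower password).toList.foldl
        (fun d c => d.insert c (d.getD c 0 + 1)) PySem.Dict.empty
    -- sum(freq.get(c, 0) for c in "0123456789abcdef") == 40
    (pvHexChars.foldl (fun acc c => acc + freq.getD c 0) (0 : Int)) == 40

-- ===== PRECONDITION & SPEC =====
def Spec_checkHash (password : String) (out : Bool) : Prop := out = checkHash_alt password
instance (password : String) (out : Bool) : Decidable (Spec_checkHash password out) := by unfold Spec_checkHash; infer_instance

-- ===== CLAIM (what is proved, stated in full; the proofs are below) =====
def Claim_equal_checkHash : Prop := ∀ (password : String), Dom_checkHash password → Spec_checkHash password (checkHash password)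

-- ===== LEMMAS AND PROOFS =====

-- A's per-character test is exactly membership in the hex alphabet
lemma pv_char (c : Char) :
    (¬ PySem.Set.contains pvCharSetA c = true ∧ ¬ PySem.Set.contains pvNumSetA c = true) ↔ c ∉ pvHexChars := by
  rw [PySem.Set.contains_iff, PySem.Set.contains_iff]
  have h1 : pvCharSetA = ['a', 'b', 'c', 'd', 'e', 'f'] := by decide
  have h2 : pvNumSetA = ['1', '2', '3', '4', '5', '6', '7', '8', '9', '0'] := by decide
  have h3 : pvHexChars = ['0', '1', '2', '3', '4', '5', '6', '7', '8', '9', 'a', 'b', 'c', 'd', 'e', 'f'] := by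
    decide
  rw [h1, h2, h3]
  simp only [List.mem_cons, List.not_mem_nil, or_false]
  tauto

lemma pvLoopA_iff (l : List Char) : pvLoopA l = true ↔ ∀ c ∈ l, c ∈ pvHexChars := by
  induction l with
  | nil => simp [pvLoopA]
  | cons c rest ih =>
    rw [pvLoopA]
    by_cases hcond : (¬ PySem.Set.contains pvCharSetA c = true ∧ ¬ PySem.Set.contains pvNumSetA c = true)
    · rw [if_pos hcond]
      have hc : c ∉ pvHexChars := (pv_char c).mp hcond
      simp only [Bool.false_eq_true, false_iff]
      intro h
      exact hc (h c List.mem_cons_self)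
    · rw [if_neg hcond, ih]
      have hc : c ∈ pvHexChars := not_not.mp (fun hno => hcond ((pv_char c).mpr hno))
      constructor
      · intro h x hx
        rcases List.mem_cons.mp hx with rfl | hx'
        · exact hc
        · exact h x hx'
      · intro h x hx
        exact h x (List.mem_cons_of_mem c hx)

-- indicator sum over a nodup list
lemma pv_indicator (S : List Char) (hS : S.Nodup) (x : Char) :
    (S.map (fun c => if x == c then (1 : Int) else 0)).sum = if x ∈ S then 1 else 0 := by
  induction S with
  | nil => simp
  | cons c rest ih =>
    have hrest := ih (List.nodup_cons.mp hS).2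
    simp only [List.map_cons, List.sum_cons, hrest, List.mem_cons]
    by_cases hx : x = c
    · subst hx
      have : x ∉ rest := (List.nodup_cons.mp hS).1
      simp [this]
    · simp [hx, beq_eq_false_iff_ne.mpr hx]

-- the histogram tallies of the hex characters sum to the count of hex positions
lemma pv_sum_counts (l : List Char) :
    (pvHexChars.map (fun c => (l.count c : Int))).sum
      = (l.countP (fun x => decide (x ∈ pvHexChars)) : Int) := by
  induction l with
  | nil => simp
  | cons x rest ih =>
    have hcount : ∀ c : Char, ((x :: rest).count c : Int)
        = (rest.count c : Int) + (if x == c then (1 : Int) else 0) := by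
      intro c
      rw [List.count_cons]
      split_ifs with h <;> simp
    have hmap : pvHexChars.map (fun c => ((x :: rest).count c : Int))
        = pvHexChars.map (fun c => (rest.count c : Int) + (if x == c then (1 : Int) else 0)) := by
      exact List.map_congr_left (fun c _ => hcount c)
    rw [hmap, List.sum_map_add, ih, pv_indicator pvHexChars (by decide) x,
      List.countP_cons]
    by_cases hx : x ∈ pvHexChars <;> simp [hx]

theorem pv_main (password : String) : checkHash password = checkHash_alt password := by
  unfold checkHash checkHash_alt
  by_cases h : PySem.Str.len password = 40
  · rw [if_pos h, if_neg (by simpa using h)]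
    simp only [PySem.Dict.foldl_insert_getD_add_one_eq_counter]
    set l := (PySem.Str.lower password).toList with hl
    have hsum : (pvHexChars.foldl (fun acc c => acc + (PySem.Dict.counter l).getD c 0) (0 : Int))
        = (l.countP (fun x => decide (x ∈ pvHexChars)) : Int) := by
      rw [PySem.List.foldl_add]
      simp only [PySem.Dict.getD_counter, zero_add]
      exact pv_sum_counts l
    rw [hsum]
    have hlen : l.length = 40 := by
      have := PySem.Str.len_eq password
      have hlow : l.length = password.toList.length := by
        rw [hl, PySem.Str.toList_lower]
        simp [PySem.Chars.lower]
      omega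
    rw [Bool.eq_iff_iff, pvLoopA_iff, beq_iff_eq]
    constructor
    · intro hall
      have : l.countP (fun x => decide (x ∈ pvHexChars)) = l.length :=
        List.countP_eq_length.mpr (fun a ha => by simpa using hall a ha)
      rw [this, hlen]; norm_num
    · intro hs
      have hcl : l.countP (fun x => decide (x ∈ pvHexChars)) = l.length := by omega
      intro c hc
      simpa using List.countP_eq_length.mp hcl c hc
  · rw [if_neg h, if_pos h]

-- ===== VERDICT (by name: the statement is the Claim_ definition above) =====
theorem checkHash_spec : Claim_equal_checkHash := by
  intro password _
  exact pv_main password
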